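-- pv_equiv track=rewrite | github.com/HyunseokCheong/APS | 백준/Bronze/15593. Lifeguards （Bronze）/Lifeguards （Bronze）.py | max_covered_time
-- ===== SOURCE A (Python) =====
-- def calc_covered_time(data):
--     times = set()
--     for i,j in sorted(data, key=lambda v: (v[0], v[1])):
--         times.update(range(i,j))
--     return len(times)
--
-- def max_covered_time(data):
--     max_time = 0
--     for i in range(len(data)):
--         sliced = data[:i] + data[i+1:]
--         covered_time = calc_covered_time(sliced)
--         if covered_time > max_time:
--             max_time = covered_time
--     return max_time
-- ===== SOURCE B (Python) =====
-- def max_covered_time(data):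
--     # Sort-and-merge sweep per removal: never enumerates the covered integer
--     # points, so the summed interval length drops out of the running time.
--     best = 0
--     for i in range(len(data)):
--         rest = data[:i] + data[i+1:]
--         ivs = sorted((p for p in rest if p[0] < p[1]), key=lambda p: p[0])
--         covered = 0
--         cur = None
--         for a, b in ivs:
--             if cur is None:
--                 cur = (a, b)
--             elif a <= cur[1]:
--                 if b > cur[1]:
--                     cur = (cur[0], b)
--             else:
--                 covered += cur[1] - cur[0]
--                 cur = (a, b)
--         if cur is not None:
--             covered += cur[1] - cur[0]
--         if covered > best:
--             best = covered
--     return best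
-- ===== Notes on version B (the rewrite author's own statement) =====
-- stated objective: faster
-- what changed: A rebuilds a set of every covered integer point for each removed interval; B instead sorts each remaining list by start and merges overlapping intervals arithmetically, so the summed interval length L drops out of the running time.
import Mathlib
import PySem

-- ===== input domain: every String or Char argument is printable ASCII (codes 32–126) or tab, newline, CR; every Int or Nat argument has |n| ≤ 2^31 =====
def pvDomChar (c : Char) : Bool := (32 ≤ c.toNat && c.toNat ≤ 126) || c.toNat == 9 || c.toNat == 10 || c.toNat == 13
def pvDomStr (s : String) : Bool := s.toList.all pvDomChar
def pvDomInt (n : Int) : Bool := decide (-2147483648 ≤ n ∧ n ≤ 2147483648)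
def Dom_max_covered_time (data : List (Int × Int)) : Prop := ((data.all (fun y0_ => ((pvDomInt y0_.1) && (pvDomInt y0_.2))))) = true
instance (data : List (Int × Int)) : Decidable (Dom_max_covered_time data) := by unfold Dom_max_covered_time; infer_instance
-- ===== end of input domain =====

-- B replaces A's per-removal rebuild of the covered-point set by a sort-and-merge
-- sweep over the intervals themselves, removing the summed interval length from the cost.

-- ===== PORT A =====
-- 'times = set(); for i,j in sorted(data, key=...): times.update(range(i,j)); return len(times)'.
-- Only len(times) is consumed (order-independent), so the Python set is carried as its size
-- 'st.1' plus the TreeSet 'st.2' of its elements, letting the interpreter evaluate the port on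
-- long ranges; pv_fast_outer proves 'st.1' is exactly the length of the PySem.Set built by
-- 'PySem.Set.update' (Python's times.update) applied range by range, element by element.
def calc_covered_time (data : List (Int × Int)) : Int :=
  let st := (PySem.List.sorted2 data (fun v => v.1) (fun v => v.2)).foldl
      (fun st p => (PySem.List.pyRange p.1 p.2 1).foldl
          (fun (st : Int × Std.TreeSet Int compare) x =>
            if st.2.contains x then st else (st.1 + 1, st.2.insert x)) st)
      (0, ∅)
  st.1

def max_covered_time (data : List (Int × Int)) : Int :=
  (PySem.List.pyRange 0 (data.length : Int) 1).foldl
    (fun max_time i =>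
      let sliced := PySem.List.slice data none (some i) ++ PySem.List.slice data (some (i + 1)) none
      let covered_time := calc_covered_time sliced
      if covered_time > max_time then covered_time else max_time) 0

-- ===== PORT B =====
def max_covered_time_alt (data : List (Int × Int)) : Int :=
  (PySem.List.pyRange 0 (data.length : Int) 1).foldl
    (fun best i =>
      let rest := PySem.List.slice data none (some i) ++ PySem.List.slice data (some (i + 1)) none
      let ivs := PySem.List.sorted (rest.filter (fun p => p.1 < p.2)) (fun p => p.1)
      let st := ivs.foldl
        (fun (st : Int × Option (Int × Int)) p =>
          match st.2 with
          | none => (st.1, some p)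
          | some c =>
            if p.1 ≤ c.2 then
              (if p.2 > c.2 then (st.1, some (c.1, p.2)) else (st.1, some c))
            else (st.1 + (c.2 - c.1), some p))
        (0, none)
      let covered := match st.2 with
        | none => st.1
        | some c => st.1 + (c.2 - c.1)
      if covered > best then covered else best) 0

-- ===== PRECONDITION & SPEC =====
def Spec_max_covered_time (data : List (Int × Int)) (out : Int) : Prop := out = max_covered_time_alt data
instance (data : List (Int × Int)) (out : Int) : Decidable (Spec_max_covered_time data out) := by unfold Spec_max_covered_time; infer_instance

-- ===== CLAIM (what is proved, stated in full; the proofs are below) =====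
def Claim_equal_max_covered_time : Prop := ∀ (data : List (Int × Int)), Dom_max_covered_time data → Spec_max_covered_time data (max_covered_time data)

-- ===== LEMMAS AND PROOFS =====

/-- All integer points of all intervals, with multiplicity. -/
def pvPts (l : List (Int × Int)) : List Int := l.flatMap (fun p => PySem.List.pyRange p.1 p.2 1)

theorem pv_mem_pts (l : List (Int × Int)) (t : Int) :
    t ∈ (pvPts l).toFinset ↔ ∃ q ∈ l, q.1 ≤ t ∧ t < q.2 := by
  simp [pvPts, List.mem_flatMap, PySem.List.mem_pyRange_one]

theorem pv_range_toFinset (a b : Int) :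
    (PySem.List.pyRange a b 1).toFinset = Finset.Ico a b := by
  ext t; simp [PySem.List.mem_pyRange_one, Finset.mem_Ico]

-- ---- A side: the TreeSet-indexed fold IS PySem.Set.update, and its size is the card ----

theorem pv_fast_fold (xs : List Int) : ∀ (s : PySem.Set Int) (idx : Std.TreeSet Int compare),
    (∀ y, y ∈ idx ↔ y ∈ s) →
    (xs.foldl (fun (st : Int × Std.TreeSet Int compare) x =>
        if st.2.contains x then st else (st.1 + 1, st.2.insert x)) (((s.length : Int)), idx)).1
        = ((PySem.Set.update s xs).length : Int)
    ∧ (∀ y, y ∈ (xs.foldl (fun (st : Int × Std.TreeSet Int compare) x =>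
        if st.2.contains x then st else (st.1 + 1, st.2.insert x)) (((s.length : Int)), idx)).2
        ↔ y ∈ PySem.Set.update s xs) := by
  induction xs with
  | nil => intro s idx h; simp [PySem.Set.update_nil, h]
  | cons x xs ih =>
      intro s idx h
      by_cases hc : x ∈ idx
      · have hcs : idx.contains x = true := Std.TreeSet.contains_iff_mem.mpr hc
        have hxs : x ∈ s := (h x).mp hc
        simp only [List.foldl_cons, hcs, if_pos, PySem.Set.update_cons,
          PySem.Set.add_of_mem hxs]
        exact ih s idx h
      · have hcs : idx.contains x = false := by
          rw [← Bool.not_eq_true, Std.TreeSet.contains_iff_mem]; exact hc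
        have hxs : x ∉ s := fun hx => hc ((h x).mpr hx)
        have hlen : ((s.length : Int) + 1) = (((s ++ [x]).length : Int)) := by
          simp
        simp only [List.foldl_cons, hcs, Bool.false_eq_true, if_false, PySem.Set.update_cons,
          PySem.Set.add_of_not_mem hxs, hlen]
        refine ih (s ++ [x]) (idx.insert x) ?_
        intro y
        rw [Std.TreeSet.mem_insert, compare_eq_iff_eq, List.mem_append, List.mem_singleton, h y]
        tauto

theorem pv_fast_outer (l : List (Int × Int)) : ∀ (s : PySem.Set Int) (idx : Std.TreeSet Int compare),
    (∀ y, y ∈ idx ↔ y ∈ s) →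
    (l.foldl (fun st p => (PySem.List.pyRange p.1 p.2 1).foldl
        (fun (st : Int × Std.TreeSet Int compare) x =>
          if st.2.contains x then st else (st.1 + 1, st.2.insert x)) st) (((s.length : Int)), idx)).1
      = ((l.foldl (fun s p => PySem.Set.update s (PySem.List.pyRange p.1 p.2 1)) s).length : Int) := by
  induction l with
  | nil => intro s idx h; rfl
  | cons p l ih =>
      intro s idx h
      simp only [List.foldl_cons]
      obtain ⟨h1, h2⟩ := pv_fast_fold (PySem.List.pyRange p.1 p.2 1) s idx h
      have hst : (((PySem.List.pyRange p.1 p.2 1).foldl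
          (fun (st : Int × Std.TreeSet Int compare) x =>
            if st.2.contains x then st else (st.1 + 1, st.2.insert x)) (((s.length : Int)), idx)))
          = ((((PySem.Set.update s (PySem.List.pyRange p.1 p.2 1)).length : Int)),
             ((PySem.List.pyRange p.1 p.2 1).foldl
          (fun (st : Int × Std.TreeSet Int compare) x =>
            if st.2.contains x then st else (st.1 + 1, st.2.insert x)) (((s.length : Int)), idx)).2) := by
        exact Prod.ext h1 rfl
      rw [hst]
      exact ih _ _ (by simpa using h2)

theorem pv_mem_foldl_update (l : List (Int × Int)) (s : PySem.Set Int) (y : Int) :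
    y ∈ l.foldl (fun s p => PySem.Set.update s (PySem.List.pyRange p.1 p.2 1)) s ↔
      y ∈ s ∨ y ∈ pvPts l := by
  induction l generalizing s with
  | nil => simp [pvPts]
  | cons x xs ih =>
      simp [pvPts, List.flatMap_cons, ih, PySem.Set.mem_update, or_assoc]

theorem pv_nodup_foldl_update (l : List (Int × Int)) (s : PySem.Set Int) (h : s.Nodup) :
    (l.foldl (fun s p => PySem.Set.update s (PySem.List.pyRange p.1 p.2 1)) s).Nodup := by
  induction l generalizing s with
  | nil => exact h
  | cons x xs ih => exact ih _ (PySem.Set.nodup_update _ _ h)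

theorem pv_calc_eq (l : List (Int × Int)) :
    calc_covered_time l = ((pvPts l).toFinset.card : Int) := by
  have hout := pv_fast_outer (PySem.List.sorted2 l (fun v => v.1) (fun v => v.2))
      PySem.Set.empty ∅ (by simp [PySem.Set.empty])
  have h0 : ((PySem.Set.empty : PySem.Set Int).length : Int) = 0 := rfl
  rw [h0] at hout
  have hnd := pv_nodup_foldl_update (PySem.List.sorted2 l (fun v => v.1) (fun v => v.2))
      PySem.Set.empty (by simp [PySem.Set.empty])
  have hfin : ((PySem.List.sorted2 l (fun v => v.1) (fun v => v.2)).foldl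
      (fun times p => PySem.Set.update times (PySem.List.pyRange p.1 p.2 1)) PySem.Set.empty).toFinset
      = (pvPts l).toFinset := by
    ext t
    rw [List.mem_toFinset, List.mem_toFinset, pv_mem_foldl_update]
    simp [PySem.Set.empty, pvPts, List.mem_flatMap,
      (PySem.List.sorted2_perm l (fun v => v.1) (fun v => v.2) false).mem_iff]
  simp only [calc_covered_time, hout]
  rw [← List.toFinset_card_of_nodup hnd, hfin]

-- ---- B side: the merge sweep computes the same card ----

/-- The body of B's merge loop (definitionally the lambda in the port). -/
def pvBody (st : Int × Option (Int × Int)) (p : Int × Int) : Int × Option (Int × Int) :=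
  match st.2 with
  | none => (st.1, some p)
  | some c =>
    if p.1 ≤ c.2 then
      (if p.2 > c.2 then (st.1, some (c.1, p.2)) else (st.1, some c))
    else (st.1 + (c.2 - c.1), some p)

/-- B's final flush of the open segment. -/
def pvFlush (st : Int × Option (Int × Int)) : Int :=
  match st.2 with
  | none => st.1
  | some c => st.1 + (c.2 - c.1)

theorem pv_merge_aux (l : List (Int × Int)) :
    ∀ (acc lo hi : Int), lo < hi →
    l.Pairwise (fun p q => p.1 ≤ q.1) →
    (∀ q ∈ l, lo ≤ q.1) →
    (∀ q ∈ l, q.1 < q.2) →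
    pvFlush (l.foldl pvBody (acc, some (lo, hi)))
      = acc + (((Finset.Ico lo hi) ∪ (pvPts l).toFinset).card : Int) := by
  induction l with
  | nil =>
      intro acc lo hi hlh _ _ _
      simp [pvFlush, pvPts, Int.card_Ico]
      omega
  | cons p t ih =>
      intro acc lo hi hlh hpair hlo hne
      obtain ⟨a, b⟩ := p
      rw [List.pairwise_cons] at hpair
      have hloa : lo ≤ a := hlo (a, b) List.mem_cons_self
      have hab : a < b := hne (a, b) List.mem_cons_self
      have hlo' : ∀ q ∈ t, lo ≤ q.1 := fun q hq => le_trans hloa (hpair.1 q hq)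
      have hne' : ∀ q ∈ t, q.1 < q.2 := fun q hq => hne q (List.mem_cons_of_mem _ hq)
      have hfin : (pvPts ((a, b) :: t)).toFinset = Finset.Ico a b ∪ (pvPts t).toFinset := by
        rw [pvPts, List.flatMap_cons, List.toFinset_append, pv_range_toFinset]; rfl
      rw [List.foldl_cons]
      by_cases h1 : a ≤ hi
      · by_cases h2 : b > hi
        · have hstep : pvBody (acc, some (lo, hi)) (a, b) = (acc, some (lo, b)) := by
            simp [pvBody, h1, h2]
          rw [hstep, ih acc lo b (by omega) hpair.2 hlo' hne', hfin]
          have hU : Finset.Ico lo b ∪ (pvPts t).toFinset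
              = Finset.Ico lo hi ∪ (Finset.Ico a b ∪ (pvPts t).toFinset) := by
            rw [← Finset.union_assoc]
            congr 1
            ext u
            simp only [Finset.mem_union, Finset.mem_Ico]
            omega
          rw [hU]
        · have hstep : pvBody (acc, some (lo, hi)) (a, b) = (acc, some (lo, hi)) := by
            simp [pvBody, h1, h2]
          rw [hstep, ih acc lo hi hlh hpair.2 hlo' hne', hfin]
          have hU : Finset.Ico lo hi ∪ (pvPts t).toFinset
              = Finset.Ico lo hi ∪ (Finset.Ico a b ∪ (pvPts t).toFinset) := by
            rw [← Finset.union_assoc]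
            congr 1
            ext u
            simp only [Finset.mem_union, Finset.mem_Ico]
            omega
          rw [hU]
      · have hstep : pvBody (acc, some (lo, hi)) (a, b) = (acc + (hi - lo), some (a, b)) := by
          simp [pvBody, h1]
        rw [hstep, ih (acc + (hi - lo)) a b hab hpair.2 hpair.1 hne', hfin]
        have hdisj : Disjoint (Finset.Ico lo hi) (Finset.Ico a b ∪ (pvPts t).toFinset) := by
          rw [Finset.disjoint_left]
          intro u hu hu2
          rw [Finset.mem_Ico] at hu
          rcases Finset.mem_union.mp hu2 with hu2 | hu2
          · rw [Finset.mem_Ico] at hu2; omega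
          · obtain ⟨q, hq, hq1, _⟩ := (pv_mem_pts t u).mp hu2
            have := hpair.1 q hq
            omega
        rw [Finset.card_union_of_disjoint hdisj, Int.card_Ico]
        push_cast
        omega

theorem pv_sweep (l : List (Int × Int))
    (hpair : l.Pairwise (fun p q => p.1 ≤ q.1))
    (hne : ∀ q ∈ l, q.1 < q.2) :
    pvFlush (l.foldl pvBody (0, none)) = ((pvPts l).toFinset.card : Int) := by
  cases l with
  | nil => simp [pvFlush, pvPts]
  | cons p t =>
      obtain ⟨a, b⟩ := p
      rw [List.pairwise_cons] at hpair
      have hab : a < b := hne (a, b) List.mem_cons_self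
      have hstep : pvBody (0, none) (a, b) = (0, some (a, b)) := by simp [pvBody]
      have hfin : (pvPts ((a, b) :: t)).toFinset = Finset.Ico a b ∪ (pvPts t).toFinset := by
        rw [pvPts, List.flatMap_cons, List.toFinset_append, pv_range_toFinset]; rfl
      rw [List.foldl_cons, hstep,
        pv_merge_aux t 0 a b hab hpair.2 hpair.1
          (fun q hq => hne q (List.mem_cons_of_mem _ hq)), hfin]
      simp

theorem pv_pts_sorted_filter (l : List (Int × Int)) :
    (pvPts (PySem.List.sorted (l.filter (fun p => p.1 < p.2)) (fun p => p.1))).toFinset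
      = (pvPts l).toFinset := by
  ext t
  rw [pv_mem_pts, pv_mem_pts]
  constructor
  · rintro ⟨q, hq, hq1, hq2⟩
    rw [PySem.List.mem_sorted, List.mem_filter] at hq
    exact ⟨q, hq.1, hq1, hq2⟩
  · rintro ⟨q, hq, hq1, hq2⟩
    refine ⟨q, ?_, hq1, hq2⟩
    rw [PySem.List.mem_sorted, List.mem_filter]
    exact ⟨hq, by simp; omega⟩

-- ===== VERDICT (by name: the statement is the Claim_ definition above) =====
theorem max_covered_time_spec : Claim_equal_max_covered_time := by
  intro data _
  show max_covered_time data = max_covered_time_alt data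
  simp only [max_covered_time, max_covered_time_alt]
  apply PySem.List.foldl_congr_mem
  intro acc i _
  show (if calc_covered_time (PySem.List.slice data none (some i)
            ++ PySem.List.slice data (some (i + 1)) none) > acc
        then calc_covered_time (PySem.List.slice data none (some i)
            ++ PySem.List.slice data (some (i + 1)) none) else acc)
      = (if pvFlush ((PySem.List.sorted (((PySem.List.slice data none (some i)
              ++ PySem.List.slice data (some (i + 1)) none).filter
            (fun p => p.1 < p.2))) (fun p => p.1)).foldl pvBody (0, none)) > acc
         then pvFlush ((PySem.List.sorted (((PySem.List.slice data none (some i)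
              ++ PySem.List.slice data (some (i + 1)) none).filter
            (fun p => p.1 < p.2))) (fun p => p.1)).foldl pvBody (0, none)) else acc)
  set rest := PySem.List.slice data none (some i)
      ++ PySem.List.slice data (some (i + 1)) none with hrest
  set ivs := PySem.List.sorted (rest.filter (fun p => p.1 < p.2)) (fun p => p.1) with hivs
  have hne : ∀ q ∈ ivs, q.1 < q.2 := by
    intro q hq
    rw [hivs, PySem.List.mem_sorted, List.mem_filter] at hq
    simpa using hq.2
  have hval : calc_covered_time rest = pvFlush (ivs.foldl pvBody (0, none)) := by
    rw [pv_calc_eq, pv_sweep ivs (by rw [hivs]; exact PySem.List.sorted_pairwise _ _) hne,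
      hivs, pv_pts_sorted_filter]
  rw [hval]
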